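-- pv_equiv track=rewrite | github.com/sydney0zq/LeetCode | interviews/meituan/2.py | final_seq_v1
-- ===== SOURCE A (Python) =====
-- def get_the_first_col(arr):
--     res = []
--     for seq in arr:
--         if len(seq) > 0:
--             res.append(seq[0])
--     return res
--
-- def final_seq_v1(n, arr_vote):
--     # update the table
--     res = []
--     while len(res) != n:
--         first_col = get_the_first_col(arr_vote)
--
--         # print ("first_col", first_col)
--         for i in first_col:
--             if i in res:
--                 continue
--             else:
--                 res.append(i)
--                 # update table
--                 for ii, seq in enumerate(arr_vote):
--                     for jj, sel in enumerate(seq):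
--                         if sel == i:
--                             del arr_vote[ii][jj]
--                 break
--     return res
-- ===== SOURCE B (Python) =====
-- def final_seq_v1(n, arr_vote):
--     # One left-to-right pass: the ranked sequence is just the first-occurrence
--     # dedup of the concatenated votes, truncated to n entries.
--     out = []
--     seen = set()
--     for seq in arr_vote:
--         for x in seq:
--             if len(out) == n:
--                 return out
--             if x not in seen:
--                 seen.add(x)
--                 out.append(x)
--     return out
-- ===== Notes on version B (the rewrite author's own statement) =====
-- stated objective: faster
-- what changed: Replaced the round-based re-scan (recompute all column fronts and physically delete the chosen value from every list, each round) by a single left-to-right pass that emits the first-occurrence dedup of the concatenated votes truncated to n.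
-- outside the precondition, e.g. on final_seq_v1(2, [[1, 1, 2], [3]]): A returns [1, 3], B returns [1, 2]; on final_seq_v1(3, [[7], [5, 7, 5, 9], [6]]): A returns [7, 5, 6], B returns [7, 5, 9]
import Mathlib
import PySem

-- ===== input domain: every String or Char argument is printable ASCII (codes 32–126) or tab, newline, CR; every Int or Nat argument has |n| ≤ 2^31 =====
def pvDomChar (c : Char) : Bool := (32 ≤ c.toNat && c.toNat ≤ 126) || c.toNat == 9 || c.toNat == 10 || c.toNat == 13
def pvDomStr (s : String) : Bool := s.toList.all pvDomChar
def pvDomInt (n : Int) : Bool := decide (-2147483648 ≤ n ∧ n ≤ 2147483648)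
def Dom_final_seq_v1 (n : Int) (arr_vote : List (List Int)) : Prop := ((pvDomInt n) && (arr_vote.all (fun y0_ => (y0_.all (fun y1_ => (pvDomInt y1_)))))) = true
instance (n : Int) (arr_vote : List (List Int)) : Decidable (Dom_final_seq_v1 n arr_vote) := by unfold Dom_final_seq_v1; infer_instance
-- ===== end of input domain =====

-- B replaces A's per-round rescan-and-delete by one pass emitting the first-occurrence
-- dedup of the concatenated votes truncated to n (objective: faster).
-- NOTE: Python A mutates arr_vote in place (deletes chosen values); B does not.
-- The equivalence proved here is about the RETURN value only.

-- ===== PORT A =====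
-- 'get_the_first_col'
def getTheFirstCol (arr : List (List Int)) : List Int :=
  arr.foldl (fun res seq => match seq with | [] => res | x :: _ => res ++ [x]) []

-- inner 'for jj, sel in enumerate(seq): if sel == i: del arr_vote[ii][jj]'
-- (delete-during-iteration: after a deletion at jj the scan continues at jj+1 of the shortened list)
def delScan (i : Int) (seq : List Int) (jj : Nat) : List Int :=
  if h : jj < seq.length then
    if seq[jj] = i then delScan i (seq.eraseIdx jj) (jj + 1)
    else delScan i seq (jj + 1)
  else seq
termination_by seq.length - jj
decreasing_by
  · simp [List.length_eraseIdx, h]; omega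
  · omega

-- 'for i in first_col: if i in res: continue else: …; break' — the chosen element, if any
def pickFirstNew (fc res : List Int) : Option Int :=
  match fc with
  | [] => none
  | i :: rest => if res.contains i then pickFirstNew rest res else some i

-- the 'while len(res) != n' loop; fuel bounds the number of iterations (the Python
-- loop does not terminate when no new element can be picked — excluded by Pre_)
def loopA (fuel : Nat) (n : Int) (arr : List (List Int)) (res : List Int) : List Int :=
  match fuel with
  | 0 => res
  | fuel + 1 =>
    if (res.length : Int) = n then res
    else
      match pickFirstNew (getTheFirstCol arr) res with
      | some i => loopA fuel n (arr.map (fun seq => delScan i seq 0)) (res ++ [i])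
      | none => loopA fuel n arr res

def final_seq_v1 (n : Int) (arr_vote : List (List Int)) : List Int :=
  loopA (n.toNat + 1) n arr_vote []

-- ===== PORT B =====
-- inner 'for x in seq' of Source B; the Bool is the early 'return out' flag
def altInner (n : Int) (seq : List Int) (out : List Int) (seen : PySem.Set Int) :
    List Int × PySem.Set Int × Bool :=
  match seq with
  | [] => (out, seen, false)
  | x :: rest =>
    if (out.length : Int) = n then (out, seen, true)
    else if PySem.Set.contains seen x then altInner n rest out seen
    else altInner n rest (out ++ [x]) (PySem.Set.add seen x)

-- outer 'for seq in arr_vote' of Source B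
def altOuter (n : Int) (arr : List (List Int)) (out : List Int) (seen : PySem.Set Int) : List Int :=
  match arr with
  | [] => out
  | seq :: rest =>
    match altInner n seq out seen with
    | (out', seen', done) => if done then out' else altOuter n rest out' seen'

def final_seq_v1_alt (n : Int) (arr_vote : List (List Int)) : List Int :=
  altOuter n arr_vote [] PySem.Set.empty

-- ===== PRECONDITION & SPEC =====
-- Pre_ excludes: n < 0 or n > number of distinct elements (there the Python while-loop
-- never terminates), and inner lists that repeat a value ranked before the final round —
-- on those A's delete-during-enumerate may leave a copy of an already-ranked value at a
-- front, an accidental corner (A can return an accidental order or diverge); B skips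
-- duplicates naturally.
def Pre_final_seq_v1 (n : Int) (arr_vote : List (List Int)) : Prop :=
  0 ≤ n ∧ n ≤ ((PySem.List.dedup arr_vote.flatten).length : Int) ∧
    ∀ seq ∈ arr_vote, ∀ v ∈ seq, 2 ≤ seq.count v →
      n - 1 ≤ (((PySem.List.dedup arr_vote.flatten).idxOf v : Nat) : Int)
instance (n : Int) (arr_vote : List (List Int)) : Decidable (Pre_final_seq_v1 n arr_vote) := by
  unfold Pre_final_seq_v1; infer_instance

def pvWitness_final_seq_v1 : Int × List (List Int) := (2, [[1, 2], [3]])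

def Spec_final_seq_v1 (n : Int) (arr_vote : List (List Int)) (out : List Int) : Prop := out = final_seq_v1_alt n arr_vote
instance (n : Int) (arr_vote : List (List Int)) (out : List Int) : Decidable (Spec_final_seq_v1 n arr_vote out) := by unfold Spec_final_seq_v1; infer_instance

-- ===== CLAIM (what is proved, stated in full; the proofs are below) =====
def Claim_equal_final_seq_v1 : Prop := ∀ (n : Int) (arr_vote : List (List Int)), Dom_final_seq_v1 n arr_vote → Pre_final_seq_v1 n arr_vote → Spec_final_seq_v1 n arr_vote (final_seq_v1 n arr_vote)

-- ===== LEMMAS AND PROOFS =====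

-- first-occurrence dedup of l, skipping elements of seen (the common normal form)
def sd (seen : List Int) : List Int → List Int
  | [] => []
  | x :: xs => if x ∈ seen then sd seen xs else x :: sd (x :: seen) xs

theorem sd_congr (l : List Int) (s t : List Int) (h : ∀ x, x ∈ s ↔ x ∈ t) :
    sd s l = sd t l := by
  induction l generalizing s t with
  | nil => rfl
  | cons x xs ih =>
    simp only [sd]
    by_cases hx : x ∈ s
    · rw [if_pos hx, if_pos ((h x).1 hx)]; exact ih s t h
    · rw [if_neg hx, if_neg (fun hc => hx ((h x).2 hc))]
      exact congrArg _ (ih _ _ (fun y => by simp [h y]))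

theorem sd_filter (l : List Int) (i : Int) (s t : List Int)
    (h : ∀ x, x ∈ t ↔ x = i ∨ x ∈ s) :
    sd s (l.filter (· ≠ i)) = sd t l := by
  induction l generalizing s t with
  | nil => rfl
  | cons x xs ih =>
    by_cases hxi : x = i
    · subst hxi
      have : x ∈ t := (h x).2 (Or.inl rfl)
      simp only [List.filter_cons, decide_eq_true_eq, sd]
      rw [if_neg (by simp), if_pos this]
      exact ih s t h
    · simp only [List.filter_cons, decide_eq_true_eq, if_pos hxi, sd]
      have hmem : x ∈ s ↔ x ∈ t := by
        constructor
        · intro hx; exact (h x).2 (Or.inr hx)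
        · intro hx; rcases (h x).1 hx with h1 | h1
          · exact absurd h1 hxi
          · exact h1
      by_cases hx : x ∈ s
      · rw [if_pos hx, if_pos (hmem.1 hx)]; exact ih s t h
      · rw [if_neg hx, if_neg (fun hc => hx (hmem.2 hc))]
        refine congrArg _ (ih _ _ (fun y => ?_))
        simp only [List.mem_cons]
        constructor
        · rintro (rfl | hy)
          · exact Or.inr (Or.inl rfl)
          · rcases (h y).1 hy with h1 | h1
            · exact Or.inl h1
            · exact Or.inr (Or.inr h1)
        · rintro (rfl | rfl | hy)
          · exact Or.inr ((h y).2 (Or.inl rfl))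
          · exact Or.inl rfl
          · exact Or.inr ((h y).2 (Or.inr hy))

theorem mem_sd (l : List Int) (s : List Int) (y : Int) : y ∈ sd s l ↔ y ∈ l ∧ y ∉ s := by
  induction l generalizing s with
  | nil => simp [sd]
  | cons x xs ih =>
    by_cases hx : x ∈ s
    · rw [show sd s (x :: xs) = sd s xs from by rw [sd, if_pos hx], ih]
      constructor
      · rintro ⟨h1, h2⟩; exact ⟨List.mem_cons_of_mem _ h1, h2⟩
      · rintro ⟨h1, h2⟩
        rcases List.mem_cons.1 h1 with rfl | h1
        · exact absurd hx h2
        · exact ⟨h1, h2⟩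
    · rw [show sd s (x :: xs) = x :: sd (x :: s) xs from by rw [sd, if_neg hx]]
      simp only [List.mem_cons, ih]
      constructor
      · rintro (rfl | ⟨h1, h2⟩)
        · exact ⟨Or.inl rfl, hx⟩
        · exact ⟨Or.inr h1, fun hc => h2 (Or.inr hc)⟩
      · rintro ⟨h1 | h1, h2⟩
        · exact Or.inl h1
        · by_cases hyx : y = x
          · exact Or.inl hyx
          · refine Or.inr ⟨h1, fun hc => ?_⟩
            rcases hc with h3 | h3
            · exact hyx h3
            · exact h2 h3

theorem sd_append (l1 l2 s : List Int) :
    sd s (l1 ++ l2) = sd s l1 ++ sd (l1.reverse ++ s) l2 := by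
  induction l1 generalizing s with
  | nil => simp [sd]
  | cons x xs ih =>
    by_cases hx : x ∈ s
    · rw [List.cons_append, show sd s (x :: (xs ++ l2)) = sd s (xs ++ l2) from by
        rw [sd, if_pos hx], ih,
        show sd s (x :: xs) = sd s xs from by rw [sd, if_pos hx]]
      refine congrArg _ (sd_congr _ _ _ (fun y => ?_))
      simp only [List.mem_append, List.mem_reverse, List.mem_cons, List.reverse_cons,
        List.not_mem_nil, or_false]
      constructor
      · rintro (h | h)
        · exact Or.inl (Or.inl h)
        · exact Or.inr h
      · rintro ((h | rfl) | h)
        · exact Or.inl h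
        · exact Or.inr hx
        · exact Or.inr h
    · rw [List.cons_append, show sd s (x :: (xs ++ l2)) = x :: sd (x :: s) (xs ++ l2) from by
        rw [sd, if_neg hx], ih,
        show sd s (x :: xs) = x :: sd (x :: s) xs from by rw [sd, if_neg hx]]
      rw [List.cons_append]
      refine congrArg _ (congrArg _ (sd_congr _ _ _ (fun y => ?_)))
      simp only [List.mem_append, List.mem_reverse, List.mem_cons, List.reverse_cons,
        List.not_mem_nil, or_false]
      tauto

theorem sd_update (l s : List Int) : PySem.Set.update s l = s ++ sd s l := by
  induction l generalizing s with
  | nil => simp [PySem.Set.update, sd]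
  | cons x xs ih =>
    simp only [PySem.Set.update, List.foldl_cons, sd]
    by_cases hx : x ∈ s
    · have : PySem.Set.add s x = s := by
        simp [PySem.Set.add]; exact hx
      rw [if_pos hx, this]
      exact ih s
    · have : PySem.Set.add s x = s ++ [x] := by
        simp [PySem.Set.add]
        intro hc
        exact absurd hc hx
      rw [if_neg hx, this]
      have := ih (s ++ [x])
      simp only [PySem.Set.update] at this ⊢
      rw [this, List.append_assoc]
      refine congrArg _ (congrArg _ (sd_congr _ _ _ (fun y => by simp [or_comm])))

theorem sd_nil_eq_dedup (l : List Int) : sd [] l = PySem.List.dedup l := by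
  have h := sd_update l []
  rw [List.nil_append] at h
  rw [PySem.List.dedup_eq_ofList, PySem.Set.ofList_eq_foldl]
  exact h.symm

-- ---- port A facts ----

theorem getTheFirstCol_eq (arr : List (List Int)) :
    getTheFirstCol arr = arr.filterMap List.head? := by
  suffices h : ∀ acc, arr.foldl (fun res seq => match seq with | [] => res | x :: _ => res ++ [x]) acc
      = acc ++ arr.filterMap List.head? by
    simpa using h []
  induction arr with
  | nil => simp
  | cons seq rest ih =>
    intro acc
    cases seq with
    | nil => simp [ih]
    | cons x xs => simp [ih]

theorem head?_filterMap_head? (arr : List (List Int)) :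
    (arr.filterMap List.head?).head? = arr.flatten.head? := by
  induction arr with
  | nil => rfl
  | cons seq rest ih =>
    cases seq with
    | nil => simpa using ih
    | cons x xs => simp

theorem mem_filterMap_head? (arr : List (List Int)) (y : Int)
    (h : y ∈ arr.filterMap List.head?) : y ∈ arr.flatten := by
  rcases List.mem_filterMap.1 h with ⟨seq, hseq, hh⟩
  exact List.mem_flatten.2 ⟨seq, hseq, List.mem_of_mem_head? hh⟩

theorem pickFirstNew_head (fc res : List Int) (h : ∀ y ∈ fc, y ∉ res) :
    pickFirstNew fc res = fc.head? := by
  cases fc with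
  | nil => rfl
  | cons i rest =>
    simp only [pickFirstNew, List.head?]
    rw [if_neg (by simpa using h i (List.mem_cons_self))]

theorem delScan_eq_filter_aux (i : Int) : ∀ (k : Nat) (seq : List Int) (jj : Nat),
    seq.length - jj ≤ k → (seq.drop jj).count i ≤ 1 →
    delScan i seq jj = seq.take jj ++ (seq.drop jj).filter (· ≠ i) := by
  intro k
  induction k with
  | zero =>
    intro seq jj hk _
    have hge : seq.length ≤ jj := by omega
    rw [delScan]
    rw [dif_neg (by omega)]
    rw [List.take_of_length_le hge, List.drop_eq_nil_of_le hge]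
    simp
  | succ k ih =>
    intro seq jj hk hcnt
    by_cases hlt : jj < seq.length
    · have hdropc : seq.drop jj = seq[jj] :: seq.drop (jj + 1) :=
        List.drop_eq_getElem_cons hlt
      rw [delScan, dif_pos hlt]
      by_cases heq : seq[jj] = i
      · -- deletion case
        have hrest0 : (seq.drop (jj + 1)).count i = 0 := by
          rw [hdropc, heq] at hcnt
          simpa using hcnt
        have hrestne : ∀ y ∈ seq.drop (jj + 1), y ≠ i := by
          intro y hy hc
          subst hc
          exact absurd (List.count_pos_iff.2 hy) (by omega)
        rw [if_pos heq]
        have hE : seq.eraseIdx jj = seq.take jj ++ seq.drop (jj + 1) :=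
          List.eraseIdx_eq_take_drop_succ seq jj
        have hlentake : (seq.take jj).length = jj := by
          simp [List.length_take]; omega
        have hlenE : (seq.eraseIdx jj).length = seq.length - 1 := by
          rw [List.length_eraseIdx_of_lt hlt]
        have hdropE : (seq.eraseIdx jj).drop (jj + 1) = (seq.drop (jj + 1)).drop 1 := by
          rw [hE, List.drop_append, List.drop_eq_nil_of_le (by omega),
            hlentake, List.nil_append]
          congr 1
          omega
        have htakeE : (seq.eraseIdx jj).take (jj + 1)
            = seq.take jj ++ (seq.drop (jj + 1)).take 1 := by
          rw [hE, List.take_append, List.take_of_length_le (by omega),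
            hlentake]
          congr 2
          omega
        rw [ih (seq.eraseIdx jj) (jj + 1) (by omega)
          (by rw [hdropE]
              have hsub := (List.drop_sublist 1 (seq.drop (jj + 1))).count_le (a := i)
              omega)]
        rw [htakeE, hdropE, hdropc, heq]
        have hfilter_all : ∀ (l : List Int), (∀ y ∈ l, y ≠ i) → l.filter (· ≠ i) = l := by
          intro l hl
          rw [List.filter_eq_self]
          intro a ha
          simpa using hl a ha
        rw [List.filter_cons, if_neg (by simp), hfilter_all _ hrestne,
          hfilter_all _ (fun y hy => hrestne y (List.mem_of_mem_drop hy))]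
        rw [List.append_assoc, List.take_append_drop]
      · rw [if_neg heq]
        rw [ih seq (jj + 1) (by omega)
          (by rw [hdropc, List.count_cons] at hcnt
              split at hcnt <;> omega)]
        rw [hdropc, List.filter_cons, if_pos (by simpa using heq),
          List.take_add_one, List.getElem?_eq_getElem hlt, Option.toList_some,
          List.append_assoc, List.singleton_append]
    · rw [delScan, dif_neg hlt]
      have hge : seq.length ≤ jj := by omega
      rw [List.take_of_length_le hge, List.drop_eq_nil_of_le hge]
      simp

theorem delScan_eq_filter (i : Int) (seq : List Int) (h : seq.count i ≤ 1) :
    delScan i seq 0 = seq.filter (· ≠ i) := by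
  have := delScan_eq_filter_aux i seq.length seq 0 (by omega)
    (by rw [List.drop_zero]; exact h)
  rw [List.take_zero, List.drop_zero, List.nil_append] at this
  exact this

theorem flatten_map_filter (arr : List (List Int)) (p : Int → Bool) :
    (arr.map (List.filter p)).flatten = arr.flatten.filter p := by
  induction arr with
  | nil => rfl
  | cons seq rest ih =>
    rw [List.map_cons, List.flatten_cons, List.flatten_cons, List.filter_append, ih]

-- A's while loop returns immediately once res has length n
theorem loopA_done (fuel : Nat) (n : Int) (arr : List (List Int)) (res : List Int)
    (h : (res.length : Int) = n) : loopA fuel n arr res = res := by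
  cases fuel with
  | zero => rfl
  | succ fuel => simp only [loopA, if_pos h]

-- A's while loop computes the truncated dedup
theorem loopA_eq (n : Int) : ∀ (fuel : Nat) (arr : List (List Int)) (res : List Int),
    (∀ seq ∈ arr, ∀ v ∈ seq, 2 ≤ seq.count v →
      n - res.length - 1 ≤ (((sd res arr.flatten).idxOf v : Nat) : Int)) →
    (∀ x ∈ arr.flatten, x ∉ res) →
    (res.length : Int) ≤ n →
    n - res.length ≤ ((sd res arr.flatten).length : Int) →
    (n - res.length).toNat ≤ fuel →
    loopA fuel n arr res = res ++ (sd res arr.flatten).take (n - res.length).toNat := by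
  intro fuel
  induction fuel with
  | zero =>
    intro arr res _ _ hle hcnt hfuel
    rw [show (n - (res.length : Int)).toNat = 0 from by omega, List.take_zero,
      List.append_nil]
    rfl
  | succ fuel ih =>
    intro arr res hK hdisj hle hcnt hfuel
    simp only [loopA]
    by_cases hn : (res.length : Int) = n
    · rw [if_pos hn, show (n - (res.length : Int)).toNat = 0 from by omega,
        List.take_zero, List.append_nil]
    · rw [if_neg hn]
      have hlt : (res.length : Int) < n := lt_of_le_of_ne hle hn
      cases hfl : arr.flatten with
      | nil =>
        exfalso
        rw [hfl] at hcnt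
        simp only [sd, List.length_nil] at hcnt
        omega
      | cons x xs =>
        rw [hfl] at hcnt
        have hxmem : x ∈ arr.flatten := by rw [hfl]; exact List.mem_cons_self
        have hxres : x ∉ res := hdisj x hxmem
        have hpick : pickFirstNew (getTheFirstCol arr) res = some x := by
          rw [getTheFirstCol_eq, pickFirstNew_head _ _
            (fun y hy => hdisj y (mem_filterMap_head? arr y hy)),
            head?_filterMap_head?, hfl]
          rfl
        rw [hpick]
        show loopA fuel n (arr.map (fun seq => delScan x seq 0)) (res ++ [x])
            = res ++ (sd res (x :: xs)).take (n - (res.length : Int)).toNat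
        have hsdres : sd res (x :: xs) = x :: sd (x :: res) xs := by
          rw [sd, if_neg hxres]
        by_cases hlast : (res.length : Int) + 1 = n
        · -- final pick: the deletion pass cannot influence the returned value
          rw [loopA_done fuel n _ (res ++ [x]) (by simp; omega)]
          rw [hsdres, show (n - (res.length : Int)).toNat = 1 from by omega,
            show (1 : Nat) = 0 + 1 from rfl, List.take_succ_cons, List.take_zero]
        · -- every non-final pick deletes all copies of x (Pre_ bounds duplicate ranks)
          have hK0 : ∀ seq ∈ arr, seq.count x ≤ 1 := by
            intro seq hseq
            by_contra hc
            have h2 : 2 ≤ seq.count x := by omega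
            have hxseq : x ∈ seq := List.count_pos_iff.1 (by omega)
            have := hK seq hseq x hxseq h2
            rw [hfl, hsdres, List.idxOf_cons_self] at this
            omega
          have hmap : arr.map (fun seq => delScan x seq 0)
              = arr.map (fun seq => seq.filter (· ≠ x)) :=
            List.map_congr_left (fun seq hseq => delScan_eq_filter x seq (hK0 seq hseq))
          rw [hmap]
          have hflat' : (arr.map (fun seq => seq.filter (· ≠ x))).flatten
              = xs.filter (· ≠ x) := by
            rw [flatten_map_filter, hfl, List.filter_cons]
            simp
          have hsdnew : sd (res ++ [x]) (xs.filter (· ≠ x)) = sd (x :: res) xs := by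
            rw [sd_filter xs x (res ++ [x]) (res ++ [x]) (fun y => by
              constructor
              · intro hy; exact Or.inr hy
              · rintro (rfl | hy)
                · simp
                · exact hy)]
            exact sd_congr xs _ _ (fun y => by simp [or_comm])
          have hK' : ∀ seq ∈ arr.map (fun seq => seq.filter (· ≠ x)), ∀ v ∈ seq,
              2 ≤ seq.count v →
              n - (res ++ [x]).length - 1
                ≤ (((sd (res ++ [x]) ((arr.map (fun seq => seq.filter (· ≠ x))).flatten)).idxOf v : Nat) : Int) := by
            intro seq hseq v hv h2
            rcases List.mem_map.1 hseq with ⟨a, ha, rfl⟩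
            rcases List.mem_filter.1 hv with ⟨hv1, hv2⟩
            have hvx : v ≠ x := by simpa using hv2
            have hsub : (a.filter (· ≠ x)).Sublist a := List.filter_sublist
            have h2a : 2 ≤ a.count v := le_trans h2 (hsub.count_le (a := v))
            have hrank := hK a ha v hv1 h2a
            rw [hfl, hsdres, List.idxOf_cons_ne _ (Ne.symm hvx)] at hrank
            rw [hflat', hsdnew]
            simp only [List.length_append, List.length_cons, List.length_nil]
            push_cast at hrank ⊢
            omega
          have hdisj' : ∀ y ∈ (arr.map (fun seq => seq.filter (· ≠ x))).flatten,
              y ∉ res ++ [x] := by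
            intro y hy
            rw [hflat'] at hy
            rcases List.mem_filter.1 hy with ⟨hy1, hy2⟩
            have hyflat : y ∈ arr.flatten := by rw [hfl]; exact List.mem_cons_of_mem _ hy1
            intro hc
            rcases List.mem_append.1 hc with hc | hc
            · exact hdisj y hyflat hc
            · rw [List.mem_singleton] at hc
              simp [hc] at hy2
          have hlen1 : ((res ++ [x]).length : Int) = res.length + 1 := by
            simp
          have hcnt' : n - ((res ++ [x]).length : Int)
              ≤ (((sd (res ++ [x]) ((arr.map (fun seq => seq.filter (· ≠ x))).flatten)).length : Int)) := by
            rw [hflat', hsdnew]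
            rw [hsdres] at hcnt
            simp only [List.length_cons] at hcnt
            rw [hlen1]
            push_cast at hcnt ⊢
            omega
          rw [ih (arr.map (fun seq => seq.filter (· ≠ x))) (res ++ [x]) hK' hdisj'
            (by rw [hlen1]; omega) hcnt' (by rw [hlen1]; omega)]
          rw [hflat', hsdnew, hsdres]
          obtain ⟨m, hm⟩ : ∃ m, (n - (res.length : Int)).toNat = m + 1 :=
            ⟨(n - (res.length : Int)).toNat - 1, by omega⟩
          rw [hm, List.take_succ_cons]
          have hm' : (n - ((res ++ [x]).length : Int)).toNat = m := by
            rw [hlen1]; omega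
          rw [hm', List.append_assoc, List.singleton_append]

-- ---- port B facts ----

theorem altInner_eq (n : Int) : ∀ (seq : List Int) (out : List Int) (seen : PySem.Set Int),
    (∀ y, PySem.Set.contains seen y = true ↔ y ∈ out) →
    (out.length : Int) ≤ n →
    ∃ seen' done,
      altInner n seq out seen
        = (out ++ (sd out seq).take (n - out.length).toNat, seen', done)
      ∧ (∀ y, PySem.Set.contains seen' y = true
            ↔ y ∈ out ++ (sd out seq).take (n - out.length).toNat)
      ∧ (done = true → ((out ++ (sd out seq).take (n - out.length).toNat).length : Int) = n)
      ∧ ((out ++ (sd out seq).take (n - out.length).toNat).length : Int) ≤ n := by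
  intro seq
  induction seq with
  | nil =>
    intro out seen hinv hle
    refine ⟨seen, false, ?_, ?_, by simp, ?_⟩
    · rw [show sd out [] = [] from rfl, List.take_nil, List.append_nil]
      rfl
    · rw [show sd out [] = [] from rfl, List.take_nil, List.append_nil]
      exact hinv
    · rw [show sd out [] = [] from rfl, List.take_nil, List.append_nil]
      exact hle
  | cons x rest ih =>
    intro out seen hinv hle
    by_cases hn : (out.length : Int) = n
    · have hk : (n - (out.length : Int)).toNat = 0 := by omega
      have hstep : altInner n (x :: rest) out seen = (out, seen, true) := by
        rw [altInner, if_pos hn]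
      refine ⟨seen, true, ?_, ?_, ?_, ?_⟩ <;>
        rw [hk, List.take_zero, List.append_nil]
      · exact hstep
      · exact hinv
      · intro _; exact hn
      · exact hle
    · have hlt : (out.length : Int) < n := lt_of_le_of_ne hle hn
      by_cases hx : x ∈ out
      · have hc : PySem.Set.contains seen x = true := (hinv x).2 hx
        have hstep : altInner n (x :: rest) out seen = altInner n rest out seen := by
          rw [altInner, if_neg hn, if_pos hc]
        have hsd : sd out (x :: rest) = sd out rest := by rw [sd, if_pos hx]
        obtain ⟨seen', done, h1, h2, h3, h4⟩ := ih out seen hinv hle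
        exact ⟨seen', done, by rw [hstep, hsd]; exact h1, by rw [hsd]; exact h2,
          by rw [hsd]; exact h3, by rw [hsd]; exact h4⟩
      · have hc : PySem.Set.contains seen x = false := by
          by_cases h : PySem.Set.contains seen x = true
          · exact absurd ((hinv x).1 h) hx
          · simpa using h
        have hstep : altInner n (x :: rest) out seen
            = altInner n rest (out ++ [x]) (PySem.Set.add seen x) := by
          rw [altInner, if_neg hn, hc]
          rfl
        have hadd : PySem.Set.add seen x = seen ++ [x] := by
          simp [PySem.Set.add, PySem.Set.contains] at hc ⊢
          intro hmem
          exact absurd hmem hc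
        have hinv' : ∀ y, PySem.Set.contains (PySem.Set.add seen x) y = true
            ↔ y ∈ out ++ [x] := by
          intro y
          rw [hadd]
          simp only [PySem.Set.contains] at hinv ⊢
          rw [List.contains_append]
          simp only [Bool.or_eq_true, List.mem_append, hinv y]
          simp
        have hle' : (((out ++ [x]).length : Int)) ≤ n := by simp; omega
        obtain ⟨seen', done, h1, h2, h3, h4⟩ := ih (out ++ [x]) (PySem.Set.add seen x) hinv' hle'
        have hsd : sd out (x :: rest) = x :: sd (x :: out) rest := by
          rw [sd, if_neg hx]
        have hsd2 : sd (out ++ [x]) rest = sd (x :: out) rest :=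
          sd_congr _ _ _ (fun y => by simp [or_comm])
        obtain ⟨m, hm⟩ : ∃ m, (n - (out.length : Int)).toNat = m + 1 :=
          ⟨(n - (out.length : Int)).toNat - 1, by omega⟩
        have hm' : (n - ((out ++ [x]).length : Int)).toNat = m := by simp; omega
        have hassemble : out ++ (sd out (x :: rest)).take (n - (out.length : Int)).toNat
            = (out ++ [x]) ++ (sd (out ++ [x]) rest).take (n - ((out ++ [x]).length : Int)).toNat := by
          rw [hsd, hm, List.take_succ_cons, hm', hsd2, List.append_assoc,
            List.singleton_append]
        refine ⟨seen', done, ?_, ?_, ?_, ?_⟩ <;> rw [hassemble]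
        · rw [hstep]; exact h1
        · exact h2
        · exact h3
        · exact h4

theorem altOuter_eq (n : Int) : ∀ (arr : List (List Int)) (out : List Int) (seen : PySem.Set Int),
    (∀ y, PySem.Set.contains seen y = true ↔ y ∈ out) →
    (out.length : Int) ≤ n →
    altOuter n arr out seen = out ++ (sd out arr.flatten).take (n - out.length).toNat := by
  intro arr
  induction arr with
  | nil =>
    intro out seen _ _
    rw [show (List.flatten ([] : List (List Int))) = [] from rfl,
      show sd out [] = [] from rfl, List.take_nil, List.append_nil]
    rfl
  | cons seq rest ih =>
    intro out seen hinv hle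
    obtain ⟨seen', done, h1, h2, h3, h4⟩ := altInner_eq n seq out seen hinv hle
    simp only [altOuter]
    rw [h1]
    have hflat : (seq :: rest).flatten = seq ++ rest.flatten := rfl
    rw [hflat, sd_append]
    set A := sd out seq with hA
    set k := (n - (out.length : Int)).toNat with hk
    rw [List.take_append]
    by_cases hdone : done = true
    · rw [if_pos hdone]
      have hlen : ((out ++ A.take k).length : Int) = n := h3 hdone
      have htk : (A.take k).length = min k A.length := by simp
      have hlen' : ((out.length : Int)) + ((min k A.length : Nat) : Int) = n := by
        simp only [List.length_append] at hlen
        rw [htk] at hlen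
        push_cast at hlen ⊢
        omega
      have hk0 : k - A.length = 0 := by omega
      rw [hk0, List.take_zero, List.append_nil]
    · rw [if_neg hdone]
      rw [ih (out ++ A.take k) seen' h2 h4]
      by_cases hcase : k ≤ A.length
      · have hkA : (A.take k).length = k := by simp [List.length_take]; omega
        have hn0 : (n - (((out ++ A.take k).length : Nat) : Int)).toNat = 0 := by
          simp only [List.length_append, hkA]
          omega
        have hk0 : k - A.length = 0 := by omega
        rw [hn0, List.take_zero, List.append_nil, hk0, List.take_zero, List.append_nil]
      · have hAk : A.take k = A := List.take_of_length_le (by omega)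
        have hkA : (A.take k).length = A.length := by rw [hAk]
        have hrest : (n - (((out ++ A.take k).length : Nat) : Int)).toNat = k - A.length := by
          simp only [List.length_append, hkA]
          omega
        rw [hrest]
        have hsdeq : sd (out ++ A.take k) rest.flatten = sd (seq.reverse ++ out) rest.flatten := by
          refine sd_congr _ _ _ (fun y => ?_)
          rw [hAk]
          simp only [List.mem_append, List.mem_reverse, hA, mem_sd]
          constructor
          · rintro (hy | ⟨hy1, hy2⟩)
            · exact Or.inr hy
            · exact Or.inl hy1
          · rintro (hy | hy)
            · by_cases hyo : y ∈ out
              · exact Or.inl hyo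
              · exact Or.inr ⟨hy, hyo⟩
            · exact Or.inl hy
        rw [hsdeq, List.append_assoc]

-- ===== VERDICT (by name: the statement is the Claim_ definition above) =====
theorem final_seq_v1_spec : Claim_equal_final_seq_v1 := by
  intro n arr _hdom hpre
  obtain ⟨hn0, hnd, hdup⟩ := hpre
  unfold Spec_final_seq_v1 final_seq_v1 final_seq_v1_alt
  rw [loopA_eq n (n.toNat + 1) arr []
      (by intro seq hseq v hv h2
          have := hdup seq hseq v hv h2
          rw [show sd ([] : List Int) arr.flatten = PySem.List.dedup arr.flatten from
            sd_nil_eq_dedup _]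
          simpa using this)
      (by simp) (by simpa using hn0)
      (by rw [show sd ([] : List Int) arr.flatten = PySem.List.dedup arr.flatten from
            sd_nil_eq_dedup _]; simpa using hnd)
      (by omega)]
  rw [altOuter_eq n arr [] PySem.Set.empty (by simp [PySem.Set.empty, PySem.Set.contains]) (by simpa using hn0)]
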